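-- pv_equiv track=rewrite | github.com/KelianB/tab-gen | backend/file_generator/chords.py | economy_score2
-- ===== SOURCE A (Python) =====
-- def economy_score2(chord):
-- 	"""This version calculate the score related to the distance between the frets played and the end of the handle
-- 	For example, a chord close to the handle will get a low score."""
--
-- 	score = 0
-- 	strings_played = [x for x in chord if x > 0]
-- 	if len(strings_played) > 1:
-- 		if 0 in chord[1:5]:
-- 			score += 1
--
-- 	frets_played = [x for x in chord if x > 1]
-- 	if len(frets_played) == 0:
-- 		return score
-- 	for finger in frets_played:
-- 		score += 1 + (abs(frets_played[0] - finger)) + finger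
--
--
-- 	return score
-- ===== SOURCE B (Python) =====
-- def economy_score2(chord):
--     # one pass: count positives and accumulate fret count/sum and distances
--     # from the first fret > 1, instead of building two filtered lists.
--     pos_count = 0
--     first_fret = None
--     fret_count = 0
--     fret_sum = 0
--     abs_sum = 0
--     for x in chord:
--         if x > 0:
--             pos_count += 1
--         if x > 1:
--             if first_fret is None:
--                 first_fret = x
--             fret_count += 1
--             fret_sum += x
--             abs_sum += abs(first_fret - x)
--     score = 1 if (pos_count > 1 and 0 in chord[1:5]) else 0
--     if fret_count == 0:
--         return score
--     return score + fret_count + fret_sum + abs_sum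
-- ===== Notes on version B (the rewrite author's own statement) =====
-- stated objective: alternative
-- what changed: B replaces A's two filtered intermediate lists and the fret loop by a single pass that maintains pos_count, the first fret > 1 and running fret count/sum/abs-distance sums, adding them in closed form at the end.
import Mathlib
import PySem

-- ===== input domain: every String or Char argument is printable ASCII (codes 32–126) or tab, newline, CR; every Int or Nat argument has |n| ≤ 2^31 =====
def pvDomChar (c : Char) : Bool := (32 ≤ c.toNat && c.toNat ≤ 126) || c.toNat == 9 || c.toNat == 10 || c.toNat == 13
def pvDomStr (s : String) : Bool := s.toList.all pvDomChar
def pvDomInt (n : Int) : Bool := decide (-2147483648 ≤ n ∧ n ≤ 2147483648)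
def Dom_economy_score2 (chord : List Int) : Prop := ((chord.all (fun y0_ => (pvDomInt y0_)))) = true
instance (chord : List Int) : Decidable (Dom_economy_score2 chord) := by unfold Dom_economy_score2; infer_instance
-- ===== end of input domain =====

-- B folds A's two list comprehensions and the fret loop into one traversal; objective: alternative (same cost, different structure).

-- ===== PORT A =====
def economy_score2 (chord : List Int) : Int :=
  let score : Int := 0
  let strings_played := chord.filter (fun x => 0 < x)
  let score := if strings_played.length > 1 then
      (if (PySem.List.slice chord (some 1) (some 5)).contains 0 then score + 1 else score)
    else score
  let frets_played := chord.filter (fun x => 1 < x)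
  if frets_played.length = 0 then score
  else frets_played.foldl (fun s finger => s + (1 + |frets_played.headD 0 - finger| + finger)) score

-- ===== PORT B =====
-- loop state: (pos_count, first_fret, fret_count, fret_sum, abs_sum)
def pvGoB : List Int → Int → Option Int → Int → Int → Int → Int × Option Int × Int × Int × Int
  | [], pc, ff, fc, fs, ab => (pc, ff, fc, fs, ab)
  | x :: rest, pc, ff, fc, fs, ab =>
    let pc := if 0 < x then pc + 1 else pc
    if 1 < x then
      let ff' := match ff with | none => some x | some f => some f
      pvGoB rest pc ff' (fc + 1) (fs + x) (ab + |ff'.getD 0 - x|)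
    else
      pvGoB rest pc ff fc fs ab

def economy_score2_alt (chord : List Int) : Int :=
  let r := pvGoB chord 0 none 0 0 0
  let pc := r.1
  let fc := r.2.2.1
  let fs := r.2.2.2.1
  let ab := r.2.2.2.2
  let score : Int := if pc > 1 ∧ (PySem.List.slice chord (some 1) (some 5)).contains 0 then 1 else 0
  if fc = 0 then score else score + fc + fs + ab

-- ===== PRECONDITION & SPEC =====
def Spec_economy_score2 (chord : List Int) (out : Int) : Prop := out = economy_score2_alt chord
instance (chord : List Int) (out : Int) : Decidable (Spec_economy_score2 chord out) := by unfold Spec_economy_score2; infer_instance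

-- ===== CLAIM (what is proved, stated in full; the proofs are below) =====
def Claim_equal_economy_score2 : Prop := ∀ (chord : List Int), Dom_economy_score2 chord → Spec_economy_score2 chord (economy_score2 chord)

-- ===== LEMMAS AND PROOFS =====

theorem pvGoB_some (l : List Int) (pc : Int) (f0 : Int) (fc fs ab : Int) :
    pvGoB l pc (some f0) fc fs ab =
      (pc + ((l.filter (fun x => 0 < x)).length : Int), some f0,
       fc + ((l.filter (fun x => 1 < x)).length : Int),
       fs + ((l.filter (fun x => 1 < x)).map id).sum,
       ab + ((l.filter (fun x => 1 < x)).map (fun x => |f0 - x|)).sum) := by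
  induction l generalizing pc fc fs ab with
  | nil => simp [pvGoB]
  | cons x rest ih =>
    by_cases h1 : 1 < x
    · have h0 : 0 < x := by omega
      simp [pvGoB, h0, h1, ih]
      and_intros <;> ring
    · by_cases h0 : 0 < x <;> simp [pvGoB, h0, h1, ih] <;> and_intros <;> ring

theorem pvGoB_none (l : List Int) (pc : Int) :
    pvGoB l pc none 0 0 0 =
      (pc + ((l.filter (fun x => 0 < x)).length : Int),
       (l.filter (fun x => 1 < x)).head?,
       ((l.filter (fun x => 1 < x)).length : Int),
       ((l.filter (fun x => 1 < x)).map id).sum,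
       (match (l.filter (fun x => 1 < x)) with
        | [] => (0 : Int)
        | f0 :: _ => ((l.filter (fun x => 1 < x)).map (fun x => |f0 - x|)).sum)) := by
  induction l generalizing pc with
  | nil => simp [pvGoB]
  | cons x rest ih =>
    by_cases h1 : 1 < x
    · have h0 : 0 < x := by omega
      simp [pvGoB, h0, h1, pvGoB_some]
      and_intros <;> first | ring | simp
    · by_cases h0 : 0 < x <;> simp [pvGoB, h0, h1, ih] <;> and_intros <;> first | ring | simp

theorem foldl_score (l : List Int) (f0 : Int) (init : Int) :
    l.foldl (fun s finger => s + (1 + |f0 - finger| + finger)) init =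
      init + (l.length : Int) + (l.map id).sum + (l.map (fun x => |f0 - x|)).sum := by
  induction l generalizing init with
  | nil => simp
  | cons x rest ih =>
    simp [ih]
    push_cast
    ring

-- ===== VERDICT (by name: the statement is the Claim_ definition above) =====
theorem economy_score2_spec : Claim_equal_economy_score2 := by
  intro chord _
  unfold Spec_economy_score2 economy_score2 economy_score2_alt
  simp only [pvGoB_none, zero_add]
  cases hF : chord.filter (fun x => 1 < x) with
  | nil =>
    by_cases hm : (0 : Int) ∈ PySem.List.slice chord (some 1) (some 5) <;>
      by_cases hl : 1 < (chord.filter (fun x => 0 < x)).length <;>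
      simp [hF, hm, hl] <;> omega
  | cons f0 rest =>
    by_cases hm : (0 : Int) ∈ PySem.List.slice chord (some 1) (some 5) <;>
      by_cases hl : 1 < (chord.filter (fun x => 0 < x)).length <;>
      simp [hF, hm, hl, foldl_score] <;> rw [if_neg (by omega)] <;> ring
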